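-- pv_equiv track=rewrite | github.com/MWittweiler/citation_analysis | citation_analysis.py | separate_text_at_ellipsis
-- ===== SOURCE A (Python) =====
-- from typing import List, Tuple, Any, Dict, Set, Union
--
-- def separate_text_at_ellipsis(text_list: List[List[str]]) -> List[List[str]]:
--     """
--     Separate text at ellipsis ('...') points, creating new sublists for text following the ellipsis. If an ellipsis is followed by an apostrophe ("...'"), it includes the apostrophe in the separation.
--
--     Args:
--         text_list: A list of sublists, each containing an ID and a text string.
--
--     Returns:
--         The modified list with additional sublists created for text following ellipsis points.
--     """
--     k = 0
--     while k < len(text_list):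
--         sublist = text_list[k]
--         if '...' in sublist[1]:
--             i1 = sublist[1].index('...')
--             if sublist[1][i1:i1+4] == "...\'":
--                 text_list.insert(k+1, [sublist[0], sublist[1][i1+4:]])
--                 sublist[1] = sublist[1][:i1+4]
--             else:
--                 text_list.insert(k+1, [sublist[0], sublist[1][i1+3:]])
--                 sublist[1] = sublist[1][:i1+3]
--         k = k+1
--     return text_list
-- ===== SOURCE B (Python) =====
-- def separate_text_at_ellipsis(text_list):
--     """Pure rebuild: split each text into ellipsis-terminated segments, then emit
--     one sublist per segment (first segment keeps any extra elements of the original)."""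
--     def segments(text):
--         segs = []
--         rest = text
--         while True:
--             i = rest.find('...')
--             if i == -1:
--                 segs.append(rest)
--                 return segs
--             cut = i + 4 if rest[i + 3:i + 4] == "'" else i + 3
--             segs.append(rest[:cut])
--             rest = rest[cut:]
--     out = []
--     for sub in text_list:
--         segs = segments(sub[1])
--         out.append(sub[:1] + [segs[0]] + sub[2:])
--         out.extend([sub[0], s] for s in segs[1:])
--     return out
-- ===== Notes on version B (the rewrite author's own statement) =====
-- stated objective: simpler
-- what changed: A walks one growing list with an index, inserting the post-ellipsis remainder right after the current item and re-truncating it in place; B is a pure two-level rebuild: it first tokenizes each text into its complete list of ellipsis-terminated segments, then emits all output sublists for that item in one go, never mutating or re-scanning the output list.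
import Mathlib
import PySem

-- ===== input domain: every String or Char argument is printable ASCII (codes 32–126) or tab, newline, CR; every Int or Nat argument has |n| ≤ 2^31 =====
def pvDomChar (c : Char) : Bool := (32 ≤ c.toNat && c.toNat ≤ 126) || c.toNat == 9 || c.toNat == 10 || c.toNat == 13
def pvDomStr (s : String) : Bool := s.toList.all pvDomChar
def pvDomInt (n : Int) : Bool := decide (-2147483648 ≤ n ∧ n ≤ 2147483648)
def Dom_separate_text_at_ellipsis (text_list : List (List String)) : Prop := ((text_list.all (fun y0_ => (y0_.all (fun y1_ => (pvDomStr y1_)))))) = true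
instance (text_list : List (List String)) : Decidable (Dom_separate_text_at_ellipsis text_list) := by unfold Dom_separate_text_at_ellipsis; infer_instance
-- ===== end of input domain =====

-- B rebuilds the output purely (tokenize each text into segments, then emit all rows)
-- instead of A's index walk over a list it mutates and extends in place; A mutates its
-- argument, so the equivalence proved here is about the RETURN value only.

-- ===== PORT A =====
-- termination helper for both loops: the text after a found '...' is strictly shorter
theorem pvA_dec (s : String) (h : PySem.Str.isIn "..." s = true) (c : Int) (hc : 0 < c) :
    (PySem.Str.slice s (some (PySem.Str.find s "..." + c)) none).toList.length < s.toList.length := by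
  have hinf : ("...".toList) <:+: s.toList := (PySem.Str.isIn_iff_infix _ _).mp h
  have hnn : 0 ≤ PySem.Str.find s "..." := (PySem.Str.find_nonneg_iff s "...").mpr hinf
  have hlen : 3 ≤ s.toList.length := by simpa using hinf.length_le
  simp only [PySem.Str.toList_slice, PySem.Chars.slice_eq_listSlice]
  rw [PySem.List.slice_from _ (by omega)]
  simp only [List.length_drop]
  omega

theorem pyGetD_pair1 (a b : String) : PySem.List.pyGetD [a, b] (1 : Int) "" = b := rfl

-- literal transliteration of A: the k-loop over the evolving list = recursion on the
-- suffix not yet visited, with the already-visited prefix as accumulator; the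
-- insert at k+1 becomes consing the new sublist onto the suffix.
-- sublist[1] / sublist[0] are guarded by Pre_ (IndexError otherwise): pyGetD;
-- '.index' is guarded by the 'in' test, so it equals PySem.Str.find here;
-- Python's locals sublist/i1 are written out inline.
def sepA_loop : List (List String) → List (List String) → List (List String)
  | acc, [] => acc
  | acc, sub :: t =>
    if h : PySem.Str.isIn "..." (PySem.List.pyGetD sub 1 "") = true then
      if PySem.Str.slice (PySem.List.pyGetD sub 1 "")
          (some (PySem.Str.find (PySem.List.pyGetD sub 1 "") "..."))
          (some (PySem.Str.find (PySem.List.pyGetD sub 1 "") "..." + 4)) = "...'" then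
        sepA_loop (acc ++ [PySem.List.pySetD sub 1 (PySem.Str.slice (PySem.List.pyGetD sub 1 "") none
            (some (PySem.Str.find (PySem.List.pyGetD sub 1 "") "..." + 4)))])
          ([PySem.List.pyGetD sub 0 "", PySem.Str.slice (PySem.List.pyGetD sub 1 "")
            (some (PySem.Str.find (PySem.List.pyGetD sub 1 "") "..." + 4)) none] :: t)
      else
        sepA_loop (acc ++ [PySem.List.pySetD sub 1 (PySem.Str.slice (PySem.List.pyGetD sub 1 "") none
            (some (PySem.Str.find (PySem.List.pyGetD sub 1 "") "..." + 3)))])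
          ([PySem.List.pyGetD sub 0 "", PySem.Str.slice (PySem.List.pyGetD sub 1 "")
            (some (PySem.Str.find (PySem.List.pyGetD sub 1 "") "..." + 3)) none] :: t)
    else
      sepA_loop (acc ++ [sub]) t
termination_by _ rest => rest.length + (rest.map (fun sub => (PySem.List.pyGetD sub 1 "").toList.length)).sum
decreasing_by
  · simp only [List.map_cons, List.sum_cons, List.length_cons, pyGetD_pair1]
    have := pvA_dec (PySem.List.pyGetD sub 1 "") h 4 (by omega)
    omega
  · simp only [List.map_cons, List.sum_cons, List.length_cons, pyGetD_pair1]
    have := pvA_dec (PySem.List.pyGetD sub 1 "") h 3 (by omega)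
    omega
  · simp only [List.map_cons, List.sum_cons, List.length_cons]
    omega

def separate_text_at_ellipsis (text_list : List (List String)) : List (List String) :=
  sepA_loop [] text_list

-- ===== PORT B =====
-- B's tokenizer: the while loop accumulating `segs` becomes recursion carrying the
-- accumulator; rest.find / the one-char peek rest[i+3:i+4] are total; the locals
-- i and cut are written out inline
def segsB (acc : List String) (rest : String) : List String :=
  if h : PySem.Str.find rest "..." = -1 then acc ++ [rest]
  else
    segsB (acc ++ [PySem.Str.slice rest none
        (some (if PySem.Str.slice rest (some (PySem.Str.find rest "..." + 3))
                  (some (PySem.Str.find rest "..." + 4)) = "'"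
               then PySem.Str.find rest "..." + 4 else PySem.Str.find rest "..." + 3))])
      (PySem.Str.slice rest
        (some (if PySem.Str.slice rest (some (PySem.Str.find rest "..." + 3))
                  (some (PySem.Str.find rest "..." + 4)) = "'"
               then PySem.Str.find rest "..." + 4 else PySem.Str.find rest "..." + 3)) none)
termination_by rest.toList.length
decreasing_by
  have hin : PySem.Str.isIn "..." rest = true :=
    (PySem.Str.isIn_iff_infix _ _).mpr ((PySem.Str.find_ne_neg_one_iff rest "...").mp h)
  split
  · exact pvA_dec rest hin 4 (by omega)
  · exact pvA_dec rest hin 3 (by omega)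

-- emit all output rows of one input sublist (first segment keeps extra elements)
def emitB (sub : List String) : List (List String) :=
  (PySem.List.slice sub none (some 1) ++ [(segsB [] (PySem.List.pyGetD sub 1 "")).headD ""]
      ++ PySem.List.slice sub (some 2) none)
    :: (segsB [] (PySem.List.pyGetD sub 1 "")).tail.map
        (fun sgt => [PySem.List.pyGetD sub 0 "", sgt])

def separate_text_at_ellipsis_alt (text_list : List (List String)) : List (List String) :=
  text_list.foldl (fun out sub => out ++ emitB sub) []

-- ===== PRECONDITION & SPEC =====
-- Pre_ excludes exactly the inputs on which A raises IndexError (a sublist with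
-- fewer than two elements); B raises there too.
def Pre_separate_text_at_ellipsis (text_list : List (List String)) : Prop :=
  ∀ sub ∈ text_list, 2 ≤ sub.length
instance (text_list : List (List String)) : Decidable (Pre_separate_text_at_ellipsis text_list) := by
  unfold Pre_separate_text_at_ellipsis; infer_instance
def pvWitness_separate_text_at_ellipsis : List (List String) := [["1", "a...'b...c"], ["2", "x"]]

def Spec_separate_text_at_ellipsis (text_list : List (List String)) (out : List (List String)) : Prop := out = separate_text_at_ellipsis_alt text_list
instance (text_list : List (List String)) (out : List (List String)) : Decidable (Spec_separate_text_at_ellipsis text_list out) := by unfold Spec_separate_text_at_ellipsis; infer_instance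

-- ===== CLAIM (what is proved, stated in full; the proofs are below) =====
def Claim_equal_separate_text_at_ellipsis : Prop := ∀ (text_list : List (List String)), Dom_separate_text_at_ellipsis text_list → Pre_separate_text_at_ellipsis text_list → Spec_separate_text_at_ellipsis text_list (separate_text_at_ellipsis text_list)

-- ===== LEMMAS AND PROOFS =====

theorem pyGetD_pair0 (a b : String) : PySem.List.pyGetD [a, b] (0 : Int) "" = a := rfl

theorem segsB_base (acc : List String) (rest : String)
    (hi : PySem.Str.find rest "..." = -1) : segsB acc rest = acc ++ [rest] := by
  rw [segsB, dif_pos hi]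

theorem segsB_step1 (acc : List String) (rest : String)
    (hi : ¬ PySem.Str.find rest "..." = -1)
    (hc : PySem.Str.slice rest (some (PySem.Str.find rest "..." + 3))
        (some (PySem.Str.find rest "..." + 4)) = "'") :
    segsB acc rest = segsB (acc ++ [PySem.Str.slice rest none (some (PySem.Str.find rest "..." + 4))])
      (PySem.Str.slice rest (some (PySem.Str.find rest "..." + 4)) none) := by
  rw [segsB, dif_neg hi, if_pos hc]

theorem segsB_step2 (acc : List String) (rest : String)
    (hi : ¬ PySem.Str.find rest "..." = -1)
    (hc : ¬ PySem.Str.slice rest (some (PySem.Str.find rest "..." + 3))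
        (some (PySem.Str.find rest "..." + 4)) = "'") :
    segsB acc rest = segsB (acc ++ [PySem.Str.slice rest none (some (PySem.Str.find rest "..." + 3))])
      (PySem.Str.slice rest (some (PySem.Str.find rest "..." + 3)) none) := by
  rw [segsB, dif_neg hi, if_neg hc]

theorem segsB_acc_aux (n : Nat) : ∀ (rest : String), rest.toList.length ≤ n →
    ∀ acc, segsB acc rest = acc ++ segsB [] rest := by
  induction n using Nat.strong_induction_on with
  | _ n ih =>
    intro rest hlen acc
    by_cases hi : PySem.Str.find rest "..." = -1
    · rw [segsB_base _ _ hi, segsB_base _ _ hi]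
      simp
    · have hin : PySem.Str.isIn "..." rest = true :=
        (PySem.Str.isIn_iff_infix _ _).mpr ((PySem.Str.find_ne_neg_one_iff rest "...").mp hi)
      by_cases hc : PySem.Str.slice rest (some (PySem.Str.find rest "..." + 3))
          (some (PySem.Str.find rest "..." + 4)) = "'"
      · rw [segsB_step1 _ _ hi hc, segsB_step1 _ _ hi hc]
        have hlt := pvA_dec rest hin 4 (by omega)
        rcases n with _ | m
        · omega
        · rw [ih m (by omega) _ (by omega), ih m (by omega) _ (by omega) ([] ++ _)]
          simp
      · rw [segsB_step2 _ _ hi hc, segsB_step2 _ _ hi hc]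
        have hlt := pvA_dec rest hin 3 (by omega)
        rcases n with _ | m
        · omega
        · rw [ih m (by omega) _ (by omega), ih m (by omega) _ (by omega) ([] ++ _)]
          simp

theorem segsB_acc (acc : List String) (rest : String) :
    segsB acc rest = acc ++ segsB [] rest :=
  segsB_acc_aux rest.toList.length rest le_rfl acc

theorem segsB_ne_nil (rest : String) : segsB [] rest ≠ [] := by
  rw [segsB]
  by_cases hi : PySem.Str.find rest "..." = -1
  · rw [dif_pos hi]; simp
  · rw [dif_neg hi, segsB_acc]; simp

-- the reassembled first row equals A's in-place update, for sublists of length ≥ 2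
theorem first_row_eq (sub : List String) (h : 2 ≤ sub.length) (v : String) :
    PySem.List.slice sub none (some 1) ++ [v] ++ PySem.List.slice sub (some 2) none =
      PySem.List.pySetD sub 1 v := by
  rcases sub with _ | ⟨a, _ | ⟨b, t⟩⟩
  · simp at h
  · simp at h
  · rw [PySem.List.slice_to _ (by norm_num), PySem.List.slice_from _ (by norm_num),
      PySem.List.pySetD_of_nonneg _ _ (by norm_num)]
    simp

-- the unchanged row of a sublist without ellipsis
theorem first_row_id (sub : List String) (h : 2 ≤ sub.length) :
    PySem.List.slice sub none (some 1) ++ [PySem.List.pyGetD sub 1 ""] ++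
      PySem.List.slice sub (some 2) none = sub := by
  rcases sub with _ | ⟨a, _ | ⟨b, t⟩⟩
  · simp at h
  · simp at h
  · rw [PySem.List.slice_to _ (by norm_num), PySem.List.slice_from _ (by norm_num)]
    have hg : PySem.List.pyGetD (a :: b :: t) (1 : Int) "" = b := by
      simp [pysem]
    rw [hg]
    simp

-- emitB of a fresh two-element row is just the mapped segments
theorem emitB_pair (id t : String) :
    emitB [id, t] = (segsB [] t).map (fun sgt => [id, sgt]) := by
  obtain ⟨hd, tl, hseg⟩ := List.exists_cons_of_ne_nil (segsB_ne_nil t)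
  unfold emitB
  rw [pyGetD_pair1, pyGetD_pair0, hseg,
    PySem.List.slice_to _ (by norm_num), PySem.List.slice_from _ (by norm_num)]
  simp

-- A's apostrophe test agrees with B's one-char peek at the found position
theorem apo_test (s : String) (h : PySem.Str.isIn "..." s = true) :
    ((PySem.Str.slice s (some (PySem.Str.find s "...")) (some (PySem.Str.find s "..." + 4)) = "...'")
      ↔ (PySem.Str.slice s (some (PySem.Str.find s "..." + 3)) (some (PySem.Str.find s "..." + 4)) = "'")) := by
  have hinf : ("...".toList) <:+: s.toList := (PySem.Str.isIn_iff_infix _ _).mp h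
  have hnn : 0 ≤ PySem.Str.find s "..." := (PySem.Str.find_nonneg_iff s "...").mpr hinf
  have hfind : PySem.Chars.find s.toList "...".toList = PySem.Str.find s "..." := by
    simp [PySem.Str.find_eq]
  have hpre : ("...".toList) <+: s.toList.drop (PySem.Str.find s "...").toNat := by
    have := (PySem.Chars.find_spec (s := s.toList) (sub := "...".toList) (by rw [hfind]; exact hnn)).1
    rwa [hfind] at this
  obtain ⟨r, hr⟩ := hpre
  have hAeq : ∀ (u v : String), u = v ↔ u.toList = v.toList := by
    intro u v
    constructor
    · intro h'; rw [h']
    · intro h'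
      have h2 := congrArg String.ofList h'
      simpa using h2
  rw [hAeq, hAeq]
  have htA : (PySem.Str.slice s (some (PySem.Str.find s "...")) (some (PySem.Str.find s "..." + 4))).toList
      = (s.toList.drop (PySem.Str.find s "...").toNat).take 4 := by
    simp only [PySem.Str.toList_slice, PySem.Chars.slice_eq_listSlice]
    rw [PySem.List.slice_toNat _ hnn (by omega)]
    rw [show (PySem.Str.find s "..." + 4).toNat - (PySem.Str.find s "...").toNat = 4 from by omega]
  have htB : (PySem.Str.slice s (some (PySem.Str.find s "..." + 3)) (some (PySem.Str.find s "..." + 4))).toList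
      = (s.toList.drop ((PySem.Str.find s "...").toNat + 3)).take 1 := by
    simp only [PySem.Str.toList_slice, PySem.Chars.slice_eq_listSlice]
    rw [PySem.List.slice_toNat _ (by omega) (by omega)]
    rw [show (PySem.Str.find s "..." + 4).toNat - (PySem.Str.find s "..." + 3).toNat = 1 from by omega]
    rw [show (PySem.Str.find s "..." + 3).toNat = (PySem.Str.find s "...").toNat + 3 from by omega]
  have h2 : s.toList.drop ((PySem.Str.find s "...").toNat + 3)
      = (s.toList.drop (PySem.Str.find s "...").toNat).drop 3 := by
    rw [List.drop_drop]
    try congr 1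
    try omega
  have h3 : "...".toList = ['.', '.', '.'] := by decide
  have h4 : "...'".toList = ['.', '.', '.', Char.ofNat 39] := by decide
  have h5 : "'".toList = [Char.ofNat 39] := by decide
  have hdrop3 : s.toList.drop ((PySem.Str.find s "...").toNat + 3) = r := by
    rw [h2, ← hr, h3]
    simp
  rw [htA, htB, hdrop3, ← hr, h3, h4, h5]
  have htake : (['.', '.', '.'] ++ r).take 4 = ['.', '.', '.'] ++ r.take 1 := by
    simp [List.take_succ_cons]
  rw [htake]
  simp

-- A's loop, started anywhere, produces the accumulator followed by B's rows
theorem sepA_loop_eq_aux (n : Nat) : ∀ (rest : List (List String)),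
    rest.length + (rest.map (fun sub => (PySem.List.pyGetD sub 1 "").toList.length)).sum ≤ n →
    (∀ sub ∈ rest, 2 ≤ sub.length) →
    ∀ acc, sepA_loop acc rest = acc ++ rest.flatMap emitB := by
  induction n using Nat.strong_induction_on with
  | _ n ih =>
    intro rest hμ hp acc
    match rest with
    | [] => rw [sepA_loop]; simp
    | sub :: t =>
      rw [sepA_loop]
      simp only [List.length_cons, List.map_cons, List.sum_cons] at hμ
      have hsub : 2 ≤ sub.length := hp sub (by simp)
      by_cases hin : PySem.Str.isIn "..." (PySem.List.pyGetD sub 1 "") = true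
      · have hinf := (PySem.Str.isIn_iff_infix _ _).mp hin
        have hnn : 0 ≤ PySem.Str.find (PySem.List.pyGetD sub 1 "") "..." :=
          (PySem.Str.find_nonneg_iff _ "...").mpr hinf
        have hine : ¬ PySem.Str.find (PySem.List.pyGetD sub 1 "") "..." = -1 := by omega
        rw [dif_pos hin]
        by_cases hapo : PySem.Str.slice (PySem.List.pyGetD sub 1 "")
            (some (PySem.Str.find (PySem.List.pyGetD sub 1 "") "..."))
            (some (PySem.Str.find (PySem.List.pyGetD sub 1 "") "..." + 4)) = "...'"
        · have hpeek := (apo_test _ hin).mp hapo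
          rw [if_pos hapo]
          have hdec := pvA_dec (PySem.List.pyGetD sub 1 "") hin 4 (by omega)
          rw [ih (n - 1) (by omega)
              _ (by simp only [List.length_cons, List.map_cons, List.sum_cons, pyGetD_pair1]; omega)
              (by
                intro x hx
                rcases List.mem_cons.mp hx with rfl | hx
                · simp
                · exact hp x (List.mem_cons_of_mem _ hx))]
          rw [List.flatMap_cons, List.flatMap_cons, emitB_pair]
          have hB : emitB sub =
              (PySem.List.pySetD sub 1 (PySem.Str.slice (PySem.List.pyGetD sub 1 "") none
                  (some (PySem.Str.find (PySem.List.pyGetD sub 1 "") "..." + 4)))) ::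
                (segsB [] (PySem.Str.slice (PySem.List.pyGetD sub 1 "")
                    (some (PySem.Str.find (PySem.List.pyGetD sub 1 "") "..." + 4)) none)).map
                  (fun sgt => [PySem.List.pyGetD sub 0 "", sgt]) := by
            unfold emitB
            rw [segsB, dif_neg hine, if_pos hpeek, segsB_acc,
              ← first_row_eq sub hsub]
            simp
          rw [hB]
          simp
        · have hpeek : ¬ PySem.Str.slice (PySem.List.pyGetD sub 1 "")
              (some (PySem.Str.find (PySem.List.pyGetD sub 1 "") "..." + 3))
              (some (PySem.Str.find (PySem.List.pyGetD sub 1 "") "..." + 4)) = "'" := by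
            intro hc; exact hapo ((apo_test _ hin).mpr hc)
          rw [if_neg hapo]
          have hdec := pvA_dec (PySem.List.pyGetD sub 1 "") hin 3 (by omega)
          rw [ih (n - 1) (by omega)
              _ (by simp only [List.length_cons, List.map_cons, List.sum_cons, pyGetD_pair1]; omega)
              (by
                intro x hx
                rcases List.mem_cons.mp hx with rfl | hx
                · simp
                · exact hp x (List.mem_cons_of_mem _ hx))]
          rw [List.flatMap_cons, List.flatMap_cons, emitB_pair]
          have hB : emitB sub =
              (PySem.List.pySetD sub 1 (PySem.Str.slice (PySem.List.pyGetD sub 1 "") none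
                  (some (PySem.Str.find (PySem.List.pyGetD sub 1 "") "..." + 3)))) ::
                (segsB [] (PySem.Str.slice (PySem.List.pyGetD sub 1 "")
                    (some (PySem.Str.find (PySem.List.pyGetD sub 1 "") "..." + 3)) none)).map
                  (fun sgt => [PySem.List.pyGetD sub 0 "", sgt]) := by
            unfold emitB
            rw [segsB, dif_neg hine, if_neg hpeek, segsB_acc,
              ← first_row_eq sub hsub]
            simp
          rw [hB]
          simp
      · rw [dif_neg hin]
        rw [ih (n - 1) (by omega) _ (by omega)
            (fun x hx => hp x (by simp [hx]))]
        have hfind : PySem.Str.find (PySem.List.pyGetD sub 1 "") "..." = -1 := by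
          rw [PySem.Str.find_eq_neg_one_iff]
          intro hc
          exact absurd ((PySem.Str.isIn_iff_infix _ _).mpr hc) (by simpa using hin)
        have hB : emitB sub = [sub] := by
          unfold emitB
          rw [segsB, dif_pos hfind]
          simp only [List.nil_append, List.headD_cons, List.tail_cons, List.map_nil]
          rw [first_row_id sub hsub]
        rw [List.flatMap_cons, hB]
        simp

theorem sepA_loop_eq (rest acc : List (List String))
    (hp : ∀ sub ∈ rest, 2 ≤ sub.length) :
    sepA_loop acc rest = acc ++ rest.flatMap emitB :=
  sepA_loop_eq_aux _ rest le_rfl hp acc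

-- ===== VERDICT (by name: the statement is the Claim_ definition above) =====
theorem separate_text_at_ellipsis_spec : Claim_equal_separate_text_at_ellipsis := by
  intro tl _ hpre
  unfold Spec_separate_text_at_ellipsis separate_text_at_ellipsis separate_text_at_ellipsis_alt
  rw [sepA_loop_eq tl [] hpre, PySem.List.foldl_append_eq_flatMap]
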